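-- pv_equiv track=rewrite | github.com/seoul01groupD/2nd | gyoo413/1259_palindrome.py | find_palin
-- ===== SOURCE A (Python) =====
-- def find_palin(number):
--     if len(number) == 0 or len(number) == 1:
--         return 'yes'
--     else:
--         if number[0] != number[-1]:
--             return 'no'
--         else:
--             number = number.replace(number[0], '', 2)
--             return find_palin(number)
-- ===== SOURCE B (Python) =====
-- def find_palin(number):
--     # Iterative decomposition of the same process: while loop instead of tail recursion.
--     while len(number) > 1:
--         if number[0] != number[-1]:
--             return 'no'
--         number = number.replace(number[0], '', 2)
--     return 'yes'
-- ===== Notes on version B (the rewrite author's own statement) =====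
-- stated objective: idiomatic
-- what changed: The tail recursion is rewritten as an explicit while loop that rebinds the string in place; the length-0/1 base case falls through the loop condition to 'yes', and the quirky replace(number[0], '', 2) step is kept exactly.
import Mathlib
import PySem

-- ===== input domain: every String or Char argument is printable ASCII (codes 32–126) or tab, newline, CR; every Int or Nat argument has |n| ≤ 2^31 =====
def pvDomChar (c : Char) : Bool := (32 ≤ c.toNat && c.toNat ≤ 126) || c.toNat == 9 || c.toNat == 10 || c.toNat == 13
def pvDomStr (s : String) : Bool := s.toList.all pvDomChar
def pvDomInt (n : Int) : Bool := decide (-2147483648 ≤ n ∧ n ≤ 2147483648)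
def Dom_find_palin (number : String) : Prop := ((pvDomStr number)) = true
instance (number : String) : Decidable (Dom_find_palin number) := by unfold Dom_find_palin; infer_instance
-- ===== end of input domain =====

-- B rewrites A's tail recursion as an explicit while loop over the same state (same replace-2 step); proved equal to A.


-- ===== PORT A =====
-- number.replace(c, '', 2): delete the first `n` occurrences of character c (here n = 2)
def pvReplaceDel (c : Char) : List Char → Nat → List Char
  | s, 0 => s
  | [], _ + 1 => []
  | x :: xs, n + 1 => if x = c then pvReplaceDel c xs n else x :: pvReplaceDel c xs (n + 1)

-- A's tail recursion, made total with fuel = the initial length (each step strictly shortens the string)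
def find_palin_go : Nat → List Char → String
  | 0, _ => "yes"
  | fuel + 1, s =>
    if s.length = 0 ∨ s.length = 1 then "yes"
    else
      if s.headD ' ' ≠ s.getLastD ' ' then "no"
      else find_palin_go fuel (pvReplaceDel (s.headD ' ') s 2)

def find_palin (number : String) : String := find_palin_go number.length number.toList

-- ===== PORT B =====
-- number.replace(c, '', 2) as Source B's stdlib call, ported as deleting the first occurrence twice
def pvDelFirst (c : Char) : List Char → List Char
  | [] => []
  | x :: xs => if x = c then xs else x :: pvDelFirst c xs

-- one iteration of B's while loop: either the loop exits with an answer, or the state is updated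
def pvPalStep (s : List Char) : List Char ⊕ String :=
  if s.length > 1 then
    if s.headD ' ' ≠ s.getLastD ' ' then Sum.inr "no"
    else Sum.inl (pvDelFirst (s.headD ' ') (pvDelFirst (s.headD ' ') s))
  else Sum.inr "yes"

-- B's while loop driver (fuel = the initial length bounds the number of iterations)
def find_palin_iter : Nat → List Char → String
  | 0, _ => "yes"
  | fuel + 1, s =>
    match pvPalStep s with
    | Sum.inr r => r
    | Sum.inl s' => find_palin_iter fuel s'

def find_palin_alt (number : String) : String := find_palin_iter number.length number.toList

-- ===== PRECONDITION & SPEC =====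
def Spec_find_palin (number : String) (out : String) : Prop := out = find_palin_alt number
instance (number : String) (out : String) : Decidable (Spec_find_palin number out) := by unfold Spec_find_palin; infer_instance

-- ===== CLAIM (what is proved, stated in full; the proofs are below) =====
def Claim_equal_find_palin : Prop := ∀ (number : String), Dom_find_palin number → Spec_find_palin number (find_palin number)

-- ===== LEMMAS AND PROOFS =====
theorem pvReplaceDel_one (c : Char) : ∀ s : List Char, pvReplaceDel c s 1 = pvDelFirst c s := by
  intro s
  induction s with
  | nil => rfl
  | cons x xs ih =>
    simp only [pvReplaceDel, pvDelFirst]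
    split_ifs with h <;> simp [ih]

theorem pvReplaceDel_two (c : Char) :
    ∀ s : List Char, pvReplaceDel c s 2 = pvDelFirst c (pvDelFirst c s) := by
  intro s
  induction s with
  | nil => rfl
  | cons x xs ih =>
    simp only [pvReplaceDel, pvDelFirst]
    split_ifs with h
    · exact pvReplaceDel_one c xs
    · simp [pvDelFirst, h, ih]

theorem go_eq_iter : ∀ (fuel : Nat) (s : List Char), find_palin_go fuel s = find_palin_iter fuel s := by
  intro fuel
  induction fuel with
  | zero => intro s; rfl
  | succ n ih =>
    intro s
    simp only [find_palin_go, find_palin_iter, pvPalStep]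
    by_cases h1 : s.length > 1
    · have h0 : ¬ (s.length = 0 ∨ s.length = 1) := by omega
      simp only [h0, if_false, h1, if_true, ne_eq, ite_not, pvReplaceDel_two]
      split_ifs with h2
      · exact ih _
      · rfl
    · rcases (by omega : s.length = 0 ∨ s.length = 1) with h0 | h0
      · have hs : s = [] := List.eq_nil_of_length_eq_zero h0
        simp [hs]
      · simp [h0]

-- ===== VERDICT (by name: the statement is the Claim_ definition above) =====
theorem find_palin_spec : Claim_equal_find_palin := by
  intro number _
  unfold Spec_find_palin find_palin find_palin_alt
  exact go_eq_iter _ _
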